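-- pv_equiv track=rewrite | github.com/MDU-C2/SLaRC-HeavySeeker-HT25 | ros_ws/src/hs_cameras/utils/server/utils.py | find_camera_topics
-- ===== SOURCE A (Python) =====
-- def find_camera_topics(topics):
--     """Return a mapping of camera_name -> best /image_raw topic."""
--     candidates = {}
--     for name, types in topics:
--         if not name.endswith("/image_raw"):
--             continue
--         if "sensor_msgs/msg/Image" not in types:
--             continue
--
--         root = name.strip("/").split("/")[0]
--
--         prev = candidates.get(root)
--         if prev is None or ("/rgb/" in name and "/rgb/" not in prev):
--             candidates[root] = name
--
--     return candidates
-- ===== SOURCE B (Python) =====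
-- def find_camera_topics(topics):
--     """Return a mapping of camera_name -> best /image_raw topic."""
--     # Pass 1: group all qualifying topic names by camera root, first-appearance order.
--     groups = {}
--     for name, types in topics:
--         if name.endswith("/image_raw") and "sensor_msgs/msg/Image" in types:
--             root = name.strip("/").split("/")[0]
--             groups[root] = groups.get(root, []) + [name]
--     # Pass 2: per root pick the first name containing '/rgb/', else the first name.
--     return {root: next((n for n in names if "/rgb/" in n), names[0])
--             for root, names in groups.items()}
-- ===== Notes on version B (the rewrite author's own statement) =====
-- stated objective: alternative
-- what changed: B replaces A's single-pass incremental best-candidate update with an explicit group-then-select decomposition: first pass groups all qualifying /image_raw topic names per camera root in first-appearance order, second pass picks per root the first name containing '/rgb/' or else the first name.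
import Mathlib
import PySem

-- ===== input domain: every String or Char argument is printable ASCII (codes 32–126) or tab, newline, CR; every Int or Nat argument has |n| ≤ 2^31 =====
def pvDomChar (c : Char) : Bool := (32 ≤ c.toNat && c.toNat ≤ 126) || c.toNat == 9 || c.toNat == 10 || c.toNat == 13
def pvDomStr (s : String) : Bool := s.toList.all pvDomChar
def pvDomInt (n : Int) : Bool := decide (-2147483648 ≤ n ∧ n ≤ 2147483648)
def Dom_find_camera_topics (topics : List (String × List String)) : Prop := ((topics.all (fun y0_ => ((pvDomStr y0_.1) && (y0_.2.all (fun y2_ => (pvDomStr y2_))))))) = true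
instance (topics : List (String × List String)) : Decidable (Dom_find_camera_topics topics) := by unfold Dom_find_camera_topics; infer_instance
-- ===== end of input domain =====

-- B replaces A's incremental best-candidate update with an explicit group-then-select pass
-- (first '/rgb/' name per root, else the first name); objective: alternative decomposition, same cost.

-- shared pure helper: name.strip("/").split("/")[0]
-- (split? with sep "/" never returns none or an empty list, so getD/headD are exact here)
def pvRoot (name : String) : String :=
  ((PySem.Str.split? (PySem.Str.stripChars name "/") "/").getD []).headD ""

-- ===== PORT A =====
def find_camera_topics (topics : List (String × List String)) : List (String × String) :=
  (topics.foldl (fun (candidates : PySem.Dict String String) p =>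
    let (name, types) := p
    if !(PySem.Str.endswith name "/image_raw") then candidates
    else if !(types.contains "sensor_msgs/msg/Image") then candidates
    else
      let root := pvRoot name
      match candidates.get? root with
      | none => candidates.insert root name
      | some prev =>
        if PySem.Str.isIn "/rgb/" name && !(PySem.Str.isIn "/rgb/" prev)
        then candidates.insert root name else candidates)
    PySem.Dict.empty).items

-- ===== PORT B =====
-- next((n for n in names if "/rgb/" in n), names[0])
def pvPick (names : List String) : String :=
  (names.find? (fun n => PySem.Str.isIn "/rgb/" n)).getD (names.headD "")

def find_camera_topics_alt (topics : List (String × List String)) : List (String × String) :=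
  let groups := topics.foldl (fun (g : PySem.Dict String (List String)) p =>
    if PySem.Str.endswith p.1 "/image_raw" && p.2.contains "sensor_msgs/msg/Image"
    then g.insert (pvRoot p.1) (g.getD (pvRoot p.1) [] ++ [p.1]) else g)
    PySem.Dict.empty
  groups.items.map (fun q => (q.1, pvPick q.2))

-- ===== PRECONDITION & SPEC =====
def Spec_find_camera_topics (topics : List (String × List String)) (out : List (String × String)) : Prop := out = find_camera_topics_alt topics
instance (topics : List (String × List String)) (out : List (String × String)) : Decidable (Spec_find_camera_topics topics out) := by unfold Spec_find_camera_topics; infer_instance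

-- ===== CLAIM (what is proved, stated in full; the proofs are below) =====
def Claim_equal_find_camera_topics : Prop := ∀ (topics : List (String × List String)), Dom_find_camera_topics topics → Spec_find_camera_topics topics (find_camera_topics topics)

-- ===== LEMMAS AND PROOFS =====

def pvSel (q : String × List String) : String × String := (q.1, pvPick q.2)

def pvStepA (candidates : PySem.Dict String String) (p : String × List String) : PySem.Dict String String :=
  let (name, types) := p
  if !(PySem.Str.endswith name "/image_raw") then candidates
  else if !(types.contains "sensor_msgs/msg/Image") then candidates
  else
    let root := pvRoot name
    match candidates.get? root with
    | none => candidates.insert root name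
    | some prev =>
      if PySem.Str.isIn "/rgb/" name && !(PySem.Str.isIn "/rgb/" prev)
      then candidates.insert root name else candidates

def pvStepB (g : PySem.Dict String (List String)) (p : String × List String) : PySem.Dict String (List String) :=
  if PySem.Str.endswith p.1 "/image_raw" && p.2.contains "sensor_msgs/msg/Image"
  then g.insert (pvRoot p.1) (g.getD (pvRoot p.1) [] ++ [p.1]) else g

def pvInv (g : PySem.Dict String (List String)) (c : PySem.Dict String String) : Prop :=
  c.items = g.items.map pvSel ∧ (∀ q ∈ g.items, q.2 ≠ []) ∧ g.keys.Nodup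

theorem pvPick_singleton (n : String) : pvPick [n] = n := by
  unfold pvPick
  cases hrgb : PySem.Chars.isIn ['/', 'r', 'g', 'b', '/'] n.toList <;>
    simp [List.find?, PySem.Str.isIn_eq, hrgb]

theorem pvPick_append (ns : List String) (name : String) (h : ns ≠ []) :
    pvPick (ns ++ [name]) =
      if PySem.Str.isIn "/rgb/" name && !(PySem.Str.isIn "/rgb/" (pvPick ns))
      then name else pvPick ns := by
  unfold pvPick
  rw [List.find?_append]
  cases hfind : ns.find? (fun n => PySem.Str.isIn "/rgb/" n) with
  | some x =>
    have hx : PySem.Chars.isIn ['/', 'r', 'g', 'b', '/'] x.toList = true := by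
      have := List.find?_some hfind
      rw [PySem.Str.isIn_eq] at this
      simpa using this
    simp [Option.or, PySem.Str.isIn_eq, hx]
  | none =>
    have hall := List.find?_eq_none.mp hfind
    cases ns with
    | nil => exact absurd rfl h
    | cons a as =>
      have ha : PySem.Chars.isIn ['/', 'r', 'g', 'b', '/'] a.toList = false := by
        have := hall a (by simp)
        rw [PySem.Str.isIn_eq] at this
        simp only [Bool.not_eq_true] at this
        simpa using this
      cases hn : PySem.Chars.isIn ['/', 'r', 'g', 'b', '/'] name.toList <;>
        simp [Option.or, List.find?, PySem.Str.isIn_eq, hn, ha]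

theorem pvGet_mk_map (l : List (String × List String)) (x : String) :
    (PySem.Dict.mk (l.map pvSel)).get? x = ((PySem.Dict.mk l).get? x).map pvPick := by
  induction l with
  | nil => rfl
  | cons q rest ih =>
    obtain ⟨k, v⟩ := q
    simp only [List.map_cons, pvSel, PySem.Dict.get?_mk_cons]
    split <;> simp [ih]

theorem pvGet_of_items_map (g : PySem.Dict String (List String)) (c : PySem.Dict String String)
    (hi : c.items = g.items.map pvSel) (x : String) :
    c.get? x = (g.get? x).map pvPick := by
  obtain ⟨ci⟩ := c; obtain ⟨gi⟩ := g
  have hi' : ci = gi.map pvSel := hi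
  subst hi'
  exact pvGet_mk_map gi x

theorem pvMem_of_get?_eq_some (l : List (String × List String)) (k : String) (v : List String)
    (h : (PySem.Dict.mk l).get? k = some v) : (k, v) ∈ l := by
  induction l with
  | nil => simp [PySem.Dict.get?] at h
  | cons q rest ih =>
    obtain ⟨k', v'⟩ := q
    rw [PySem.Dict.get?_mk_cons] at h
    by_cases hk : (k' == k) = true
    · have hk' : k' = k := beq_iff_eq.mp hk
      subst hk'
      simp at h
      subst h
      exact List.mem_cons_self
    · simp [hk] at h
      exact List.mem_cons_of_mem _ (ih h)

theorem pvInv_step (g : PySem.Dict String (List String)) (c : PySem.Dict String String)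
    (p : String × List String) (h : pvInv g c) : pvInv (pvStepB g p) (pvStepA c p) := by
  obtain ⟨hi, hne, hnd⟩ := h
  obtain ⟨name, types⟩ := p
  unfold pvStepA pvStepB
  by_cases h1 : PySem.Str.endswith name "/image_raw" = true
  · by_cases h2 : types.contains "sensor_msgs/msg/Image" = true
    · simp only [h1, h2, Bool.not_true, Bool.and_self, if_true, Bool.false_eq_true, if_false]
      have hget := pvGet_of_items_map g c hi (pvRoot name)
      cases hg : g.get? (pvRoot name) with
      | none =>
        have hc : c.get? (pvRoot name) = none := by rw [hget, hg]; rfl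
        have hgc : g.contains (pvRoot name) = false := by
          rw [PySem.Dict.contains_eq_isSome_get?, hg]; rfl
        have hcc : c.contains (pvRoot name) = false := by
          rw [PySem.Dict.contains_eq_isSome_get?, hc]; rfl
        rw [hc]
        refine ⟨?_, ?_, PySem.Dict.nodup_keys_insert _ _ _ hnd⟩
        · rw [PySem.Dict.items_insert_of_not_contains _ _ hcc,
            PySem.Dict.items_insert_of_not_contains _ _ hgc,
            PySem.Dict.getD_of_not_contains _ _ hgc]
          simp [hi, pvSel, pvPick_singleton]
        · intro q hq
          rw [PySem.Dict.items_insert_of_not_contains _ _ hgc] at hq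
          rcases List.mem_append.mp hq with hq | hq
          · exact hne q hq
          · simp at hq; simp [hq]
      | some ns =>
        have hc : c.get? (pvRoot name) = some (pvPick ns) := by rw [hget, hg]; rfl
        have hgc : g.contains (pvRoot name) = true := by
          rw [PySem.Dict.contains_eq_isSome_get?, hg]; rfl
        have hcc : c.contains (pvRoot name) = true := by
          rw [PySem.Dict.contains_eq_isSome_get?, hc]; rfl
        have hmem : (pvRoot name, ns) ∈ g.items := by
          obtain ⟨gi⟩ := g
          exact pvMem_of_get?_eq_some gi _ _ hg
        have hns : ns ≠ [] := hne _ hmem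
        have hgetD : g.getD (pvRoot name) [] = ns := PySem.Dict.getD_of_get?_eq_some _ _ hg
        simp only [hc, hgetD]
        have hpick := pvPick_append ns name hns
        have hBitems := PySem.Dict.items_insert_of_contains g (ns ++ [name]) hgc
        refine ⟨?_, ?_, PySem.Dict.nodup_keys_insert _ _ _ hnd⟩
        · by_cases hcond : (PySem.Str.isIn "/rgb/" name && !(PySem.Str.isIn "/rgb/" (pvPick ns))) = true
          · have hp : pvPick (ns ++ [name]) = name := by rw [hpick, if_pos hcond]
            rw [if_pos hcond,
              PySem.Dict.items_insert_of_contains c name hcc, hBitems, hi,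
              List.map_map, List.map_map]
            apply List.map_congr_left
            intro q _
            by_cases hk : (q.1 == pvRoot name) = true
            · simp [Function.comp, pvSel, hk, hp]
            · simp [Function.comp, pvSel, hk]
          · have hp : pvPick (ns ++ [name]) = pvPick ns := by rw [hpick, if_neg hcond]
            rw [if_neg hcond, hBitems, List.map_map, hi]
            apply List.map_congr_left
            intro q hq
            by_cases hk : (q.1 == pvRoot name) = true
            · have hkeq : q.1 = pvRoot name := beq_iff_eq.mp hk
              have : g.get? q.1 = some q.2 := by
                obtain ⟨q1, q2⟩ := q
                exact PySem.Dict.get?_of_mem_items g hq hnd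
              rw [hkeq, hg] at this
              have hq2 : q.2 = ns := by injection this.symm
              simp [Function.comp, pvSel, hk, hp, hkeq, hq2]
            · simp [Function.comp, pvSel, hk]
        · intro q hq
          rw [hBitems] at hq
          obtain ⟨q', hq', hmap⟩ := List.mem_map.mp hq
          by_cases hk : (q'.1 == pvRoot name) = true
          · rw [if_pos hk] at hmap
            simp [← hmap, hns]
          · rw [if_neg hk] at hmap
            exact hmap ▸ hne q' hq'
    · simp only [h1, h2]
      simp only [Bool.not_true, Bool.false_eq_true, if_false, Bool.and_false]
      exact ⟨hi, hne, hnd⟩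
  · have h1' : PySem.Str.endswith name "/image_raw" = false := by
      cases hh : PySem.Str.endswith name "/image_raw" <;> simp_all
    simp only [h1', Bool.not_false, if_true, Bool.false_and, Bool.false_eq_true, if_false]
    exact ⟨hi, hne, hnd⟩

theorem pvInv_foldl (topics : List (String × List String))
    (g : PySem.Dict String (List String)) (c : PySem.Dict String String) (h : pvInv g c) :
    pvInv (topics.foldl pvStepB g) (topics.foldl pvStepA c) := by
  induction topics generalizing g c with
  | nil => exact h
  | cons p ps ih => exact ih _ _ (pvInv_step g c p h)

-- ===== VERDICT (by name: the statement is the Claim_ definition above) =====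
theorem find_camera_topics_spec : Claim_equal_find_camera_topics := by
  intro topics _
  unfold Spec_find_camera_topics find_camera_topics find_camera_topics_alt
  have h := pvInv_foldl topics PySem.Dict.empty PySem.Dict.empty
    ⟨rfl, fun q hq => absurd hq (by simp [show (PySem.Dict.empty : PySem.Dict String (List String)).items = [] from rfl]),
     PySem.Dict.nodup_keys_empty⟩
  exact h.1
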